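-- pv_equiv track=rewrite | github.com/fnonnilavoro-ux/bolle_app | streamlit_app.py | split_lines_by_type
-- ===== SOURCE A (Python) =====
-- def split_lines_by_type(text: str, width: int = 128):
--     """Ritorna (order, headers_idx, details_idx, headers_lines, details_lines)
--        order: lista degli indici originali e tipo: [('01', idx01), ('02', idx02), ...]"""
--     lines = text.splitlines()
--     order = []
--     headers_idx, details_idx = [], []
--     headers_lines, details_lines = [], []
--     for i, line in enumerate(lines):
--         rec_type = line[:2]
--         if rec_type == "01":
--             headers_idx.append(i)
--             headers_lines.append(line[:width].ljust(width))
--             order.append(("01", i))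
--         else:
--             details_idx.append(i)
--             details_lines.append(line[:width].ljust(width))
--             order.append(("02", i))
--     return order, headers_idx, details_idx, headers_lines, details_lines
-- ===== SOURCE B (Python) =====
-- def split_lines_by_type(text: str, width: int = 128):
--     """Classify once into `order`; every other output is derived FROM `order`:
--     the index lists by partitioning on the label, the padded lines by random
--     access lines[i] over those indices (the prefix test runs once per line)."""
--     lines = text.splitlines()
--     order = [(("01" if line[:2] == "01" else "02"), i) for i, line in enumerate(lines)]
--     headers_idx = [i for tag, i in order if tag == "01"]
--     details_idx = [i for tag, i in order if tag == "02"]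
--     headers_lines = [lines[i][:width].ljust(width) for i in headers_idx]
--     details_lines = [lines[i][:width].ljust(width) for i in details_idx]
--     return order, headers_idx, details_idx, headers_lines, details_lines
-- ===== Notes on version B (the rewrite author's own statement) =====
-- stated objective: alternative
-- what changed: Instead of A's single five-accumulator loop, B classifies each line once into the tagged `order` list and then derives everything from it: index lists by partitioning order on the label, and the padded line lists by random access lines[i] over those index lists, so the prefix test is evaluated once per line and no list is built by re-scanning the text.
import Mathlib
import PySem

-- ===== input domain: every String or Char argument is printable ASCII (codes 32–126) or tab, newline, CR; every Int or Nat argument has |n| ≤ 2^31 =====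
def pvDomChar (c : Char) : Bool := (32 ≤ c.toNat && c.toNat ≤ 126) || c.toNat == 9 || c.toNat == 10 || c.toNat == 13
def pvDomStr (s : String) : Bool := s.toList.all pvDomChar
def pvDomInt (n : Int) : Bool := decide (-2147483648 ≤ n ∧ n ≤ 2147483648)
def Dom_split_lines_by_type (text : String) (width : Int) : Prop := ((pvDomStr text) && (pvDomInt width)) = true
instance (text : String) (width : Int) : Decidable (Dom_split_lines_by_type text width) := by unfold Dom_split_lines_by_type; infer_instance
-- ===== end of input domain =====

-- B classifies each line once into the tagged `order` list and derives the other four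
-- outputs from it (partition on the label, then random access lines[i]); same cost,
-- a different decomposition than A's single five-accumulator loop.

-- shared primitive: Python's `line[:width].ljust(width)` (exact: slice, then pad with spaces up to width)
def pvCut (line : String) (width : Int) : String :=
  let t := PySem.List.slice line.toList none (some width)
  String.ofList (t ++ List.replicate (width.toNat - t.length) ' ')

-- shared primitive: Python's `line[:2] == "01"`
def pvIsHeader (line : String) : Bool :=
  decide (PySem.List.slice line.toList none (some 2) = ['0', '1'])

-- ===== PORT A =====
def split_lines_by_type (text : String) (width : Int) : (List (String × Int)) × List Int × List Int × List String × List String :=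
  let lines := PySem.Str.splitlines text
  (PySem.List.enumerate lines 0).foldl
    (fun acc p =>
      match acc, p with
      | (order, hidx, didx, hls, dls), (i, line) =>
        if pvIsHeader line then
          (order ++ [("01", i)], hidx ++ [i], didx, hls ++ [pvCut line width], dls)
        else
          (order ++ [("02", i)], hidx, didx ++ [i], hls, dls ++ [pvCut line width]))
    ([], [], [], [], [])

-- ===== PORT B =====
-- lines[i] ported as pyGetD with default ""; every i in the index lists is in range
def split_lines_by_type_alt (text : String) (width : Int) : (List (String × Int)) × List Int × List Int × List String × List String :=
  let lines := PySem.Str.splitlines text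
  let order := (PySem.List.enumerate lines 0).map
    (fun p => ((if pvIsHeader p.2 then "01" else "02"), p.1))
  let headers_idx := (order.filter (fun q => q.1 == "01")).map (·.2)
  let details_idx := (order.filter (fun q => q.1 == "02")).map (·.2)
  (order, headers_idx, details_idx,
   headers_idx.map (fun i => pvCut (PySem.List.pyGetD lines i "") width),
   details_idx.map (fun i => pvCut (PySem.List.pyGetD lines i "") width))

-- ===== PRECONDITION & SPEC =====
def Spec_split_lines_by_type (text : String) (width : Int) (out : (List (String × Int)) × List Int × List Int × List String × List String) : Prop := out = split_lines_by_type_alt text width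
instance (text : String) (width : Int) (out : (List (String × Int)) × List Int × List Int × List String × List String) : Decidable (Spec_split_lines_by_type text width out) := by unfold Spec_split_lines_by_type; infer_instance

-- ===== CLAIM (what is proved, stated in full; the proofs are below) =====
def Claim_equal_split_lines_by_type : Prop := ∀ (text : String) (width : Int), Dom_split_lines_by_type text width → Spec_split_lines_by_type text width (split_lines_by_type text width)

-- ===== LEMMAS AND PROOFS =====

-- loop invariant: A's fold from arbitrary accumulators appends exactly the map/filter normal forms
lemma fold_char (width : Int) (ls : List String) (s : Int)
    (o : List (String × Int)) (h d : List Int) (hl dl : List String) :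
    (PySem.List.enumerate ls s).foldl
      (fun acc p =>
        match acc, p with
        | (order, hidx, didx, hls, dls), (i, line) =>
          if pvIsHeader line then
            (order ++ [("01", i)], hidx ++ [i], didx, hls ++ [pvCut line width], dls)
          else
            (order ++ [("02", i)], hidx, didx ++ [i], hls, dls ++ [pvCut line width]))
      (o, h, d, hl, dl)
    =
    (o ++ (PySem.List.enumerate ls s).map (fun p => ((if pvIsHeader p.2 then "01" else "02"), p.1)),
     h ++ ((PySem.List.enumerate ls s).filter fun p => pvIsHeader p.2).map (·.1),
     d ++ ((PySem.List.enumerate ls s).filter fun p => !pvIsHeader p.2).map (·.1),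
     hl ++ ((PySem.List.enumerate ls s).filter fun p => pvIsHeader p.2).map (fun p => pvCut p.2 width),
     dl ++ ((PySem.List.enumerate ls s).filter fun p => !pvIsHeader p.2).map (fun p => pvCut p.2 width)) := by
  induction ls generalizing s o h d hl dl with
  | nil => simp [PySem.List.enumerate_nil]
  | cons x xs ih =>
    rw [PySem.List.enumerate_cons]
    by_cases hx : pvIsHeader x = true
    · simp [List.foldl_cons, hx, ih, List.append_assoc]
    · simp [List.foldl_cons, hx, ih, List.append_assoc]

-- every member of enumerate ls 0 satisfies pyGetD ls i "" = line
lemma pyGetD_of_mem_enumerate (ls : List String) (p : Int × String)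
    (hp : p ∈ PySem.List.enumerate ls 0) : PySem.List.pyGetD ls p.1 "" = p.2 := by
  rcases (PySem.List.mem_enumerate_iff ls 0 p).1 hp with ⟨k, hk, rfl⟩
  simp [PySem.List.pyGetD_natCast, List.getD_eq_getElem?_getD, hk]

-- pushing B's filter through B's map of the tagging function
lemma filter_tag (ls : List String) (s : Int) (t : String) (b : Bool)
    (hb : ∀ l : String, ((if pvIsHeader l then "01" else "02") == t) = (pvIsHeader l == b)) :
    ((PySem.List.enumerate ls s).map
        (fun p => ((if pvIsHeader p.2 then "01" else "02"), p.1))).filter (fun q => q.1 == t)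
      = ((PySem.List.enumerate ls s).filter (fun p => pvIsHeader p.2 == b)).map
          (fun p => ((if pvIsHeader p.2 then "01" else "02"), p.1)) := by
  rw [List.filter_map]
  congr 1
  apply List.filter_congr
  intro p _
  simpa using hb p.2

theorem split_lines_by_type_spec_aux (text : String) (width : Int) :
    split_lines_by_type text width = split_lines_by_type_alt text width := by
  unfold split_lines_by_type split_lines_by_type_alt
  simp only []
  rw [fold_char]
  simp only [List.nil_append]
  rw [filter_tag _ _ "01" true (by intro l; cases pvIsHeader l <;> simp),
      filter_tag _ _ "02" false (by intro l; cases pvIsHeader l <;> simp)]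
  simp only [Prod.mk.injEq, List.map_map]
  have hfT : (fun p : Int × String => pvIsHeader p.2 == true) = (fun p : Int × String => pvIsHeader p.2) := by
    funext p; simp
  have hfF : (fun p : Int × String => pvIsHeader p.2 == false) = (fun p : Int × String => !pvIsHeader p.2) := by
    funext p; simp
  rw [hfT, hfF]
  refine ⟨trivial, ?_, ?_, ?_, ?_⟩
  · simp [Function.comp_def]
  · simp [Function.comp_def]
  · symm
    apply List.map_congr_left
    intro p hp
    have := pyGetD_of_mem_enumerate _ _ (List.mem_of_mem_filter hp)
    simp [Function.comp_def, this]
  · symm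
    apply List.map_congr_left
    intro p hp
    have := pyGetD_of_mem_enumerate _ _ (List.mem_of_mem_filter hp)
    simp [Function.comp_def, this]

-- ===== VERDICT (by name: the statement is the Claim_ definition above) =====
theorem split_lines_by_type_spec : Claim_equal_split_lines_by_type := by
  intro text width _
  exact split_lines_by_type_spec_aux text width
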